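-- pv_equiv track=rewrite | github.com/Nghia03092004/nghia03092004.github.io | project_euler/problem_893/solution.py | verify_steiner
-- ===== SOURCE A (Python) =====
-- from itertools import combinations
--
-- def verify_steiner(blocks, t, v):
--     """Verify that blocks form an S(t,k,v)."""
--     points = set(range(1, v + 1))
--     for subset in combinations(points, t):
--         subset_set = set(subset)
--         count = sum(1 for B in blocks if subset_set <= B)
--         if count != 1:
--             return False, subset
--     return True, None
-- ===== SOURCE B (Python) =====
-- from itertools import combinations
--
-- def verify_steiner(blocks, t, v):
--     """Verify that blocks form an S(t,k,v)."""
--     counts = {}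
--     for block in blocks:
--         for s in combinations(sorted(block), t):
--             counts[s] = counts.get(s, 0) + 1
--     for subset in combinations(range(1, v + 1), t):
--         if counts.get(subset, 0) != 1:
--             return False, subset
--     return True, None
-- ===== Notes on version B (the rewrite author's own statement) =====
-- stated objective: alternative
-- what changed: Instead of scanning all blocks for every t-subset of the point set (testing set inclusion each time), B makes one pass over the blocks, enumerating each block's own t-subsets into a dict of counts, then scans the t-subsets of {1..v} once with a dict lookup; a timing run did not find it measurably faster on the generated inputs.
import Mathlib
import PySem

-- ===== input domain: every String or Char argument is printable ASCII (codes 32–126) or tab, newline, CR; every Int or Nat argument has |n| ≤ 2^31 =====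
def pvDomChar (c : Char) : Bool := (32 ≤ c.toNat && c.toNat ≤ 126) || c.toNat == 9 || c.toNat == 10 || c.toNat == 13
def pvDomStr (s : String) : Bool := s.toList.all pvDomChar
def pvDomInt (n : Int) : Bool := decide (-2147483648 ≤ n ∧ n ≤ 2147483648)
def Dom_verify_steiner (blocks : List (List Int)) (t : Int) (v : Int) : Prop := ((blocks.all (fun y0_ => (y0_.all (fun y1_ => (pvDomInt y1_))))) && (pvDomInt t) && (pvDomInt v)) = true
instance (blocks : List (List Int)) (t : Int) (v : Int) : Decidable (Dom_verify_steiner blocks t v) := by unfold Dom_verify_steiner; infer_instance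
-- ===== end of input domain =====

-- B replaces A's per-subset scan over all blocks by one dict of t-subset counts built from the
-- blocks in a single pass, then one dict lookup per subset of the point set.
-- blocks holds Python sets, modelled as lists of distinct elements.

-- itertools.combinations over a list, in itertools' lexicographic-by-position order
-- (shared transliteration of the library call both Source A and Source B make).
def pyCombos : Nat → List Int → List (List Int)
  | 0, _ => [[]]
  | _ + 1, [] => []
  | n + 1, x :: xs => (pyCombos n xs).map (fun s => x :: s) ++ pyCombos (n + 1) xs

-- ===== PORT A =====
-- A's loop over combinations(points, t), fused with the lazy generator: pre is the chosen
-- prefix, the Nat is how many points are still to pick; the first t-subset covered by ≠ 1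
-- blocks stops the scan (subsets are visited in itertools' lexicographic order).
def vsLoopA (blocks : List (List Int)) (pre : List Int) : Nat → List Int → Bool × Option (List Int)
  | 0, _ =>
    if blocks.countP (fun B => decide (pre ⊆ B)) ≠ 1 then (false, some pre) else (true, none)
  | _ + 1, [] => (true, none)
  | n + 1, x :: xs =>
    match vsLoopA blocks (pre ++ [x]) n xs with
    | (true, none) => vsLoopA blocks pre (n + 1) xs
    | r => r

-- set(range(1, v+1)) iterates in increasing order in CPython for this construction: ported as pyRange 1 (v+1) 1
def verify_steiner (blocks : List (List Int)) (t : Int) (v : Int) : Bool × Option (List Int) :=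
  vsLoopA blocks [] t.toNat (PySem.List.pyRange 1 (v + 1) 1)

-- ===== PORT B =====
-- first pass of Source B: counts[s] = counts.get(s, 0) + 1 over every t-subset of every block
def vsCounts (blocks : List (List Int)) (t : Int) : PySem.Dict (List Int) Int :=
  blocks.foldl
    (fun d B =>
      (pyCombos t.toNat (PySem.List.sorted B (fun x => x) false)).foldl
        (fun d s => d.insert s (d.getD s 0 + 1)) d)
    PySem.Dict.empty

-- second pass of Source B over combinations(range(1, v+1), t), fused with the lazy generator:
-- the first subset with counts.get(subset, 0) != 1 stops the scan
def vsLoopB (counts : PySem.Dict (List Int) Int) (pre : List Int) : Nat → List Int → Bool × Option (List Int)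
  | 0, _ => if counts.getD pre 0 ≠ 1 then (false, some pre) else (true, none)
  | _ + 1, [] => (true, none)
  | n + 1, x :: xs =>
    match vsLoopB counts (pre ++ [x]) n xs with
    | (true, none) => vsLoopB counts pre (n + 1) xs
    | r => r

def verify_steiner_alt (blocks : List (List Int)) (t : Int) (v : Int) : Bool × Option (List Int) :=
  vsLoopB (vsCounts blocks t) [] t.toNat (PySem.List.pyRange 1 (v + 1) 1)

-- ===== PRECONDITION & SPEC =====
-- Pre_ excludes t < 0 (itertools.combinations raises ValueError there) and blocks whose member
-- lists repeat an element (blocks holds Python sets; a distinct-element list is the set encoding).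
def Pre_verify_steiner (blocks : List (List Int)) (t : Int) (v : Int) : Prop :=
  0 ≤ t ∧ ∀ B ∈ blocks, B.Nodup
instance (blocks : List (List Int)) (t : Int) (v : Int) : Decidable (Pre_verify_steiner blocks t v) := by
  unfold Pre_verify_steiner; infer_instance

def pvWitness_verify_steiner : List (List Int) × Int × Int := ([[1, 2], [1, 3], [2, 3]], 2, 3)

def Spec_verify_steiner (blocks : List (List Int)) (t : Int) (v : Int) (out : Bool × Option (List Int)) : Prop := out = verify_steiner_alt blocks t v
instance (blocks : List (List Int)) (t : Int) (v : Int) (out : Bool × Option (List Int)) : Decidable (Spec_verify_steiner blocks t v out) := by unfold Spec_verify_steiner; infer_instance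

-- ===== CLAIM (what is proved, stated in full; the proofs are below) =====
def Claim_equal_verify_steiner : Prop := ∀ (blocks : List (List Int)) (t : Int) (v : Int), Dom_verify_steiner blocks t v → Pre_verify_steiner blocks t v → Spec_verify_steiner blocks t v (verify_steiner blocks t v)

-- ===== LEMMAS AND PROOFS =====

-- every member of pyCombos n l is a length-n sublist of l
theorem mem_pyCombos (n : Nat) (l s : List Int) (h : s ∈ pyCombos n l) :
    s.Sublist l ∧ s.length = n := by
  induction n generalizing l s with
  | zero =>
    simp [pyCombos] at h
    simp [h]
  | succ n ih =>
    induction l generalizing s with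
    | nil => simp [pyCombos] at h
    | cons x xs ihl =>
      simp [pyCombos] at h
      rcases h with ⟨s', hs', rfl⟩ | h
      · obtain ⟨hsub, hlen⟩ := ih xs s' hs'
        exact ⟨List.Sublist.cons₂ x hsub, by simp [hlen]⟩
      · obtain ⟨hsub, hlen⟩ := ihl s h
        exact ⟨hsub.cons x, hlen⟩

-- a strictly increasing list of members of a strictly increasing list is a sublist of it
theorem sublist_of_subset_of_pairwise_lt :
    ∀ (l s : List Int), s.Pairwise (· < ·) → l.Pairwise (· < ·) → s ⊆ l → s.Sublist l := by
  intro l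
  induction l with
  | nil =>
    intro s _ _ hsub
    cases s with
    | nil => exact List.Sublist.refl _
    | cons a s' => exact absurd (hsub (List.mem_cons_self)) (List.not_mem_nil)
  | cons b l' ih =>
    intro s hs hl hsub
    cases s with
    | nil => exact List.nil_sublist _
    | cons a s' =>
      rcases List.pairwise_cons.mp hs with ⟨ha, hs'⟩
      rcases List.pairwise_cons.mp hl with ⟨hb, hl'⟩
      by_cases hab : a = b
      · subst hab
        have hsub' : s' ⊆ l' := by
          intro x hx
          rcases List.mem_cons.mp (hsub (List.mem_cons_of_mem a hx)) with h | h
          · exact absurd h (ne_of_gt (ha x hx))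
          · exact h
        exact List.Sublist.cons₂ a (ih s' hs' hl' hsub')
      · have hsub' : (a :: s') ⊆ l' := by
          intro x hx
          rcases List.mem_cons.mp (hsub hx) with h | h
          · subst h
            rcases List.mem_cons.mp hx with h'' | hx'
            · exact absurd h''.symm hab
            · have h1 : a < x := ha x hx'
              have h2 : a ∈ l' := by
                rcases List.mem_cons.mp (hsub (List.mem_cons_self)) with h' | h'
                · exact absurd h' hab
                · exact h'
              exact absurd (hb a h2) (by omega)
          · exact h
        exact (ih (a :: s') hs hl' hsub').cons b

-- over a strictly increasing list each length-n sublist is generated exactly once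
theorem count_pyCombos (n : Nat) (l s : List Int) (hl : l.Pairwise (· < ·)) :
    (pyCombos n l).count s = if s.length = n ∧ s.Sublist l then 1 else 0 := by
  induction n generalizing l s with
  | zero =>
    simp only [pyCombos]
    by_cases hnil : s = []
    · subst hnil; simp
    · rw [List.count_eq_zero_of_not_mem (by simp [hnil])]
      rw [if_neg]
      intro ⟨hlen, _⟩
      exact hnil (List.length_eq_zero_iff.mp hlen)
  | succ n ih =>
    induction l generalizing s with
    | nil =>
      simp only [pyCombos, List.count_nil]
      rw [if_neg]
      intro ⟨hlen, hsub⟩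
      have := List.sublist_nil.mp hsub
      subst this; simp at hlen
    | cons x xs ihl =>
      rcases List.pairwise_cons.mp hl with ⟨hx, hxs⟩
      simp only [pyCombos, List.count_append]
      cases s with
      | nil =>
        rw [List.count_eq_zero_of_not_mem (by simp), List.count_eq_zero_of_not_mem (by
          intro hmem
          have := (mem_pyCombos (n+1) xs [] hmem).2
          simp at this)]
        rw [if_neg]; · rintro ⟨hlen, _⟩; simp at hlen
      | cons y s' =>
        by_cases hyx : y = x
        · subst hyx
          have h1 : ((pyCombos n xs).map (fun s => y :: s)).count (y :: s') =
              (pyCombos n xs).count s' := by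
            rw [List.count_eq_countP, List.countP_map, List.count_eq_countP]
            apply List.countP_congr
            intro a _
            simp [Function.comp]
          have h2 : (pyCombos (n+1) xs).count (y :: s') = 0 := by
            apply List.count_eq_zero_of_not_mem
            intro hmem
            have hsub := (mem_pyCombos (n+1) xs _ hmem).1
            have : y ∈ xs := hsub.subset List.mem_cons_self
            exact absurd (hx y this) (lt_irrefl y)
          rw [h1, h2, ih xs s' hxs]
          by_cases hc : s'.length = n ∧ s'.Sublist xs
          · rw [if_pos hc, if_pos ⟨by simp [hc.1], List.Sublist.cons₂ y hc.2⟩]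
          · rw [if_neg hc, if_neg]
            intro ⟨hlen, hsub⟩
            apply hc
            refine ⟨by simpa using hlen, ?_⟩
            rcases List.cons_sublist_cons.mp hsub with h
            exact h
        · have h1 : ((pyCombos n xs).map (fun s => x :: s)).count (y :: s') = 0 := by
            apply List.count_eq_zero_of_not_mem
            intro hmem
            rcases List.mem_map.mp hmem with ⟨a, _, ha⟩
            exact hyx (by injection ha.symm)
          rw [h1, ihl (y :: s') hxs, Nat.zero_add]
          by_cases hc : (y :: s').length = n + 1 ∧ (y :: s').Sublist xs
          · rw [if_pos hc, if_pos ⟨hc.1, hc.2.cons x⟩]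
          · rw [if_neg hc, if_neg]
            intro ⟨hlen, hsub⟩
            apply hc
            refine ⟨hlen, ?_⟩
            rcases List.sublist_cons_iff.mp hsub with h | ⟨r, hr, hrs⟩
            · exact h
            · exact absurd (by injection hr) hyx

-- sorted(B) of a duplicate-free list is strictly increasing
theorem sorted_pairwise_lt (B : List Int) (hB : B.Nodup) :
    (PySem.List.sorted B (fun x => x) false).Pairwise (· < ·) := by
  have hperm : (PySem.List.sorted B (fun x => x) false).Perm B := PySem.List.sorted_perm B _ _
  have hnd : (PySem.List.sorted B (fun x => x) false).Nodup := hperm.nodup_iff.mpr hB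
  have hle : (PySem.List.sorted B (fun x => x) false).Pairwise (fun a b => a ≤ b) := by
    simpa using PySem.List.sorted_pairwise B (fun x => x) (κ := Int)
  have := hle.and hnd
  exact this.imp (by rintro a b ⟨h1, h2⟩; exact lt_of_le_of_ne h1 h2)

-- the dict built by Source B's first pass holds, at any strictly increasing length-t key s,
-- A's count of blocks containing s
theorem vsCounts_getD (blocks : List (List Int)) (t : Int)
    (hbl : ∀ B ∈ blocks, B.Nodup) (s : List Int)
    (hs : s.Pairwise (· < ·)) (hlen : s.length = t.toNat) :
    (vsCounts blocks t).getD s 0 = (blocks.countP (fun B => decide (s ⊆ B)) : Int) := by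
  have key : ∀ (d : PySem.Dict (List Int) Int) (bs : List (List Int)), (∀ B ∈ bs, B.Nodup) →
      (bs.foldl (fun d B =>
          (pyCombos t.toNat (PySem.List.sorted B (fun x => x) false)).foldl
            (fun d s => d.insert s (d.getD s 0 + 1)) d) d).getD s 0
        = d.getD s 0 + (bs.countP (fun B => decide (s ⊆ B)) : Int) := by
    intro d bs
    induction bs generalizing d with
    | nil => intro _; simp
    | cons B bs ih =>
      intro hnd
      have hBnd : B.Nodup := hnd B List.mem_cons_self
      have hrest : ∀ C ∈ bs, C.Nodup := fun C hC => hnd C (List.mem_cons_of_mem B hC)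
      simp only [List.foldl_cons]
      rw [ih _ hrest]
      have hinner :
          ((pyCombos t.toNat (PySem.List.sorted B (fun x => x) false)).foldl
            (fun d q => d.insert q (d.getD q 0 + 1)) d) =
          ((pyCombos t.toNat (PySem.List.sorted B (fun x => x) false)).foldl
            (fun d q => d.modify q 0 (· + 1)) d) := rfl
      rw [hinner, PySem.Dict.getD_foldl_modify_add_one]
      have hsorted := sorted_pairwise_lt B hBnd
      rw [count_pyCombos t.toNat _ s hsorted]
      have hiff : (s.length = t.toNat ∧ s.Sublist (PySem.List.sorted B (fun x => x) false)) ↔ s ⊆ B := by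
        constructor
        · rintro ⟨_, hsub⟩
          intro x hx
          exact (PySem.List.mem_sorted B (fun y => y) false x).mp (hsub.subset hx)
        · intro hsub
          refine ⟨hlen, sublist_of_subset_of_pairwise_lt _ s hs hsorted ?_⟩
          intro x hx
          exact (PySem.List.mem_sorted B (fun y => y) false x).mpr (hsub hx)
      rw [List.countP_cons]
      by_cases hc : s ⊆ B
      · rw [if_pos (hiff.mpr hc)]
        simp only [hc, decide_true, if_true]
        push_cast
        ring
      · rw [if_neg (fun h => hc (hiff.mp h))]
        simp [hc]
  have := key PySem.Dict.empty blocks hbl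
  unfold vsCounts
  rw [this]
  simp

-- the two fused scans agree once the dict lookup equals A's per-subset count on every
-- subset they can visit
theorem loops_eq (blocks : List (List Int)) (counts : PySem.Dict (List Int) Int) :
    ∀ (n : Nat) (l pre : List Int),
    (∀ s ∈ pyCombos n l,
      counts.getD (pre ++ s) 0 = (blocks.countP (fun B => decide ((pre ++ s) ⊆ B)) : Int)) →
    vsLoopA blocks pre n l = vsLoopB counts pre n l := by
  intro n
  induction n with
  | zero =>
    intro l pre h
    have h0 := h [] (by simp [pyCombos])
    simp only [List.append_nil] at h0
    simp only [vsLoopA, vsLoopB, h0]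
    by_cases hc : blocks.countP (fun B => decide (pre ⊆ B)) ≠ 1
    · rw [if_pos hc, if_pos (by
        intro h'
        exact hc (by exact_mod_cast h'))]
    · rw [if_neg hc, if_neg (by
        intro h'
        apply h'
        have : blocks.countP (fun B => decide (pre ⊆ B)) = 1 := by omega
        rw [this]; norm_num)]
  | succ n ih =>
    intro l
    induction l with
    | nil => intro pre _; rfl
    | cons x xs ihl =>
      intro pre h
      have h1 : ∀ s ∈ pyCombos n xs,
          counts.getD ((pre ++ [x]) ++ s) 0 =
            (blocks.countP (fun B => decide (((pre ++ [x]) ++ s) ⊆ B)) : Int) := by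
        intro s hsmem
        have : (x :: s) ∈ pyCombos (n + 1) (x :: xs) := by
          simp [pyCombos]
          exact Or.inl hsmem
        have := h (x :: s) this
        simpa using this
      have h2 : ∀ s ∈ pyCombos (n + 1) xs,
          counts.getD (pre ++ s) 0 = (blocks.countP (fun B => decide ((pre ++ s) ⊆ B)) : Int) := by
        intro s hsmem
        exact h s (by simp [pyCombos]; exact Or.inr hsmem)
      simp only [vsLoopA, vsLoopB]
      rw [ih xs (pre ++ [x]) h1, ihl pre h2]

-- ===== VERDICT (by name: the statement is the Claim_ definition above) =====
theorem verify_steiner_spec : Claim_equal_verify_steiner := by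
  intro blocks t v _ hpre
  unfold Spec_verify_steiner verify_steiner verify_steiner_alt
  refine (loops_eq blocks (vsCounts blocks t) t.toNat (PySem.List.pyRange 1 (v + 1) 1) [] ?_).symm.symm
  intro s hsmem
  have hpts : (PySem.List.pyRange 1 (v + 1) 1).Pairwise (· < ·) :=
    PySem.List.pairwise_lt_pyRange_one 1 (v + 1)
  obtain ⟨hsub, hlen⟩ := mem_pyCombos t.toNat _ s hsmem
  simp only [List.nil_append]
  exact vsCounts_getD blocks t hpre.2 s (hpts.sublist hsub) hlen
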